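-- pv_equiv track=rewrite | github.com/struggling-student/PythonExercises | Esami/2024-2025/2025-09-15/program.py | organizza_parole
-- ===== SOURCE A (Python) =====
-- def massime_lettere(parola:str) -> set[str]:
--     'trovo tutte le lettere che appaiono più volte nella parola'
--     minuscola = parola.lower()
--     M = max([ minuscola.count(c) for c in minuscola])
--     #le lettere non devono apparire più volte nel risultato
--     return {c for c in minuscola if minuscola.count(c) == M}
--
-- def organizza_parole(parole:set[str]) -> dict[str,list[str]]:
--     def criterio_ordinamento(parola):
--         'ordino indipendentemente dal case, e secondo il case se uguali'
--         return parola.lower(), parola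
--     dizionario = {}
--     for parola in parole:
--         frequenti = massime_lettere(parola)
--         for lettera in frequenti:
--             if lettera not in dizionario:
--                 dizionario[lettera] = []
--             dizionario[lettera].append(parola)
--     for lettera in dizionario:
--         dizionario[lettera].sort(key=criterio_ordinamento)
--     return dizionario
-- ===== SOURCE B (Python) =====
-- def organizza_parole(parole):
--     'one pass: count letters with a dict; binary-insert each word at its sorted bucket position'
--     def chiave(parola):
--         return (parola.lower(), parola)
--     dizionario = {}
--     for parola in parole:
--         minuscola = parola.lower()
--         conteggi = {}
--         for c in minuscola:
--             conteggi[c] = conteggi.get(c, 0) + 1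
--         M = max(conteggi.values())
--         k = chiave(parola)
--         for lettera, n in conteggi.items():
--             if n == M:
--                 lista = dizionario.setdefault(lettera, [])
--                 lo, hi = 0, len(lista)
--                 while lo < hi:
--                     mid = (lo + hi) // 2
--                     if chiave(lista[mid]) <= k:
--                         lo = mid + 1
--                     else:
--                         hi = mid
--                 lista.insert(lo, parola)
--     return dizionario
-- ===== Notes on version B (the rewrite author's own statement) =====
-- stated objective: alternative
-- what changed: Replaces A's quadratic per-word str.count scans with a single counting dict per word, and replaces A's append-everywhere-then-sort-every-bucket structure with a one-pass binary-search insertion that places each word at its ordered bucket position as it is seen, so the final per-bucket sort loop disappears.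
import Mathlib
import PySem

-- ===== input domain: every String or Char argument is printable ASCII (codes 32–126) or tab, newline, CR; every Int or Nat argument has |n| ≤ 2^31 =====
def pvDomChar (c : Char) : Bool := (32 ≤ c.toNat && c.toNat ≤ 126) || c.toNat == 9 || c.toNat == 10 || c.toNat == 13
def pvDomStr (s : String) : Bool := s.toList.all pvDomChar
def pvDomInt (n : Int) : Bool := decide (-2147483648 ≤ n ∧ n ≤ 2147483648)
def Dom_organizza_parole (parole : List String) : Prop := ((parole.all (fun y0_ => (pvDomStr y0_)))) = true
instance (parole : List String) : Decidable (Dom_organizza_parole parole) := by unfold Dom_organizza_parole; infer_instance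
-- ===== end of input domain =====

-- B replaces A's quadratic per-word str.count scans by one counting dict per word and A's
-- append-then-sort-every-bucket structure by a one-pass sorted insertion (no final sort loop);
-- same return value (alternative decomposition, not claimed faster).

-- ===== PORT A =====
def massime_lettere (parola : String) : List String :=
  let minuscola := (PySem.Str.lower parola).toList
  -- max([...]) raises ValueError on the empty word; such inputs are excluded by Pre_
  let M : Int := (PySem.List.max? (minuscola.map (fun c => (minuscola.count c : Int))) (fun v => v)).getD 0
  PySem.Set.ofList ((minuscola.filter (fun c => (minuscola.count c : Int) == M)).map (fun c => String.ofList [c]))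

def organizza_parole (parole : List String) : List (String × List String) :=
  let dizionario : PySem.Dict String (List String) :=
    parole.foldl (fun dizionario parola =>
      let frequenti := massime_lettere parola
      frequenti.foldl (fun dizionario lettera =>
        let dizionario := if dizionario.contains lettera then dizionario
                          else dizionario.insert lettera []
        dizionario.modify lettera [] (fun xs => xs ++ [parola])) dizionario)
      PySem.Dict.empty
  -- final loop: dizionario[lettera].sort(key=criterio_ordinamento), key = (parola.lower(), parola)
  (dizionario.keys.foldl (fun d lettera =>
      d.modify lettera [] (fun xs => PySem.List.sorted2 xs (fun p => PySem.Str.lower p) (fun p => p))) dizionario).items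

-- ===== PORT B =====
-- chiave(x) <= chiave(w) on the tuples (x.lower(), x) and (w.lower(), w)
def chiaveLe (x w : String) : Bool :=
  decide (PySem.Str.lower x < PySem.Str.lower w) ||
    (PySem.Str.lower x == PySem.Str.lower w && decide (x ≤ w))

-- the hand-written binary search 'lo, hi = 0, len(lista); while lo < hi: ...', ported step for step;
-- lista[mid] is always in range (lo ≤ mid < hi ≤ len(lista)), so List.getD with default "" is exact there
def trovaPos (lista : List String) (parola : String) (lo hi : Nat) : Nat :=
  if _h : lo < hi then
    let mid := (lo + hi) / 2
    if chiaveLe (lista.getD mid "") parola then trovaPos lista parola (mid + 1) hi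
    else trovaPos lista parola lo mid
  else lo
termination_by hi - lo
decreasing_by all_goals omega

-- '... ; lista.insert(lo, parola)'
def inserisci (lista : List String) (parola : String) : List String :=
  let lo := trovaPos lista parola 0 lista.length
  PySem.List.insert lista (lo : Int) parola

def organizza_parole_alt (parole : List String) : List (String × List String) :=
  (parole.foldl (fun dizionario parola =>
      let minuscola := (PySem.Str.lower parola).toList
      let conteggi : PySem.Dict Char Int := PySem.Dict.counter minuscola
      -- max(conteggi.values()) raises ValueError on the empty word; excluded by Pre_
      let M : Int := (PySem.List.max? conteggi.values (fun v => v)).getD 0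
      conteggi.items.foldl (fun dizionario p =>
        if p.2 == M then
          let lettera := String.ofList [p.1]
          dizionario.insert lettera (inserisci (dizionario.getD lettera []) parola)
        else dizionario) dizionario)
    (PySem.Dict.empty : PySem.Dict String (List String))).items

-- ===== PRECONDITION & SPEC =====
-- Pre_ excludes inputs containing the empty word, on which Python A (and B) raise ValueError (max of an empty sequence)
def Pre_organizza_parole (parole : List String) : Prop := ∀ p ∈ parole, p ≠ ""
instance (parole : List String) : Decidable (Pre_organizza_parole parole) := by unfold Pre_organizza_parole; infer_instance
def pvWitness_organizza_parole : List String := ["Ciao", "bab", "Bb"]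

def Spec_organizza_parole (parole : List String) (out : List (String × List String)) : Prop := out = organizza_parole_alt parole
instance (parole : List String) (out : List (String × List String)) : Decidable (Spec_organizza_parole parole out) := by unfold Spec_organizza_parole; infer_instance

-- ===== CLAIM (what is proved, stated in full; the proofs are below) =====
def Claim_equal_organizza_parole : Prop := ∀ (parole : List String), Dom_organizza_parole parole → Pre_organizza_parole parole → Spec_organizza_parole parole (organizza_parole parole)

-- ===== LEMMAS AND PROOFS =====

-- the bucket sort used by A, and the letter-string constructor
def sortB (xs : List String) : List String :=
  PySem.List.sorted2 xs (fun p => PySem.Str.lower p) (fun p => p)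

-- the strict 'before' predicate sorted2 uses
def beforeB (a b : String) : Bool :=
  decide (PySem.Str.lower a < PySem.Str.lower b) ||
    (!decide (PySem.Str.lower b < PySem.Str.lower a) && decide (a < b))

-- B's dict is A's raw dict with every bucket sorted
def mapD (d : PySem.Dict String (List String)) : PySem.Dict String (List String) :=
  ⟨d.items.map (fun p => (p.1, sortB p.2))⟩

lemma chiaveLe_eq_not_beforeB (x w : String) : chiaveLe x w = !(beforeB w x) := by
  unfold chiaveLe beforeB
  rcases lt_trichotomy (PySem.Str.lower x) (PySem.Str.lower w) with h | h | h
  · simp [h, asymm h]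
  · simp only [h, lt_irrefl, decide_false, Bool.false_or, Bool.not_false, Bool.true_and, beq_self_eq_true]
    rw [Bool.eq_iff_iff]
    simp [not_lt, le_iff_lt_or_eq, String.ext_iff]
  · simp [h, asymm h, (ne_of_gt h : PySem.Str.lower x ≠ _)]

lemma chiaveLe_total (a b : String) (h : chiaveLe a b = false) : chiaveLe b a = true := by
  unfold chiaveLe at *
  rcases lt_trichotomy (PySem.Str.lower a) (PySem.Str.lower b) with hl | hl | hl
  · simp [hl] at h
  · simp only [hl, lt_irrefl, decide_false, Bool.false_or, beq_self_eq_true, Bool.true_and] at h ⊢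
    simpa using le_of_not_ge (by simpa using h)
  · simp [hl, asymm hl]

lemma chiaveLe_trans (a b c : String) (h1 : chiaveLe a b = true) (h2 : chiaveLe b c = true) :
    chiaveLe a c = true := by
  unfold chiaveLe at *
  simp only [Bool.or_eq_true, decide_eq_true_eq, Bool.and_eq_true, beq_iff_eq] at h1 h2 ⊢
  rcases h1 with h1 | ⟨h1, h1'⟩ <;> rcases h2 with h2 | ⟨h2, h2'⟩
  · exact Or.inl (lt_trans h1 h2)
  · exact Or.inl (h2 ▸ h1)
  · exact Or.inl (h1 ▸ h2)
  · exact Or.inr ⟨h1.trans h2, le_trans h1' h2'⟩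

lemma sortB_append_singleton (xs : List String) (w : String) :
    sortB (xs ++ [w]) = PySem.List.insertBy (fun a b => beforeB a b) w (sortB xs) := by
  simp [sortB, beforeB, PySem.List.sorted2, List.foldl_append]

lemma sortB_nil : sortB [] = [] := rfl

-- buckets produced by sortB are sorted under chiaveLe
def SorB (L : List String) : Prop := L.Pairwise (fun a b => chiaveLe a b = true)

lemma beforeB_eq_not_chiaveLe (w y : String) : beforeB w y = !chiaveLe y w := by
  rw [chiaveLe_eq_not_beforeB, Bool.not_not]

lemma insertBy_sor (w : String) (L : List String) (h : SorB L) :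
    SorB (PySem.List.insertBy (fun a b => beforeB a b) w L) := by
  induction L with
  | nil => simp [PySem.List.insertBy, SorB]
  | cons y ys ih =>
      rcases List.pairwise_cons.mp h with ⟨hy, hys⟩
      simp only [PySem.List.insertBy]
      by_cases hb : beforeB w y = true
      · rw [if_pos hb]
        have hyw : chiaveLe y w = false := by
          have := beforeB_eq_not_chiaveLe w y
          rw [hb] at this
          cases hcw : chiaveLe y w
          · rfl
          · rw [hcw] at this; exact absurd this.symm (by simp)
        have hwy : chiaveLe w y = true := chiaveLe_total _ _ hyw
        refine List.pairwise_cons.mpr ⟨?_, h⟩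
        intro z hz
        rcases List.mem_cons.mp hz with rfl | hz
        · exact hwy
        · exact chiaveLe_trans w y z hwy (hy z hz)
      · rw [if_neg hb]
        have hyw : chiaveLe y w = true := by
          have := beforeB_eq_not_chiaveLe w y
          cases hcw : chiaveLe y w
          · rw [hcw] at this; simp at this; exact absurd this hb
          · rfl
        refine List.pairwise_cons.mpr ⟨?_, ih hys⟩
        intro z hz
        rcases (PySem.List.mem_insertBy _ _ _ _).mp hz with rfl | hz
        · exact hyw
        · exact hy z hz

lemma sor_sortB (xs : List String) : SorB (sortB xs) := by
  induction xs using List.reverseRecOn with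
  | nil => simp [SorB, sortB, PySem.List.sorted2]
  | append_singleton xs w ih =>
      rw [sortB_append_singleton]
      exact insertBy_sor w _ ih

lemma sor_mono (L : List String) (h : SorB L) (w : String) :
    ∀ i j, i ≤ j → j < L.length → chiaveLe (L.getD j "") w = true →
      chiaveLe (L.getD i "") w = true := by
  intro i j hij hj hcw
  rcases eq_or_lt_of_le hij with rfl | hlt
  · exact hcw
  · have hi : i < L.length := lt_trans hlt hj
    have hp := (List.pairwise_iff_getElem.mp h) i j hi hj hlt
    rw [List.getD_eq_getElem L "" hj] at hcw
    rw [List.getD_eq_getElem L "" hi]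
    exact chiaveLe_trans _ _ _ hp hcw

lemma trovaPos_spec (L : List String) (w : String) :
    ∀ (n lo hi : Nat), hi - lo = n → hi ≤ L.length → lo ≤ hi →
    (∀ i j, i ≤ j → j < L.length → chiaveLe (L.getD j "") w = true → chiaveLe (L.getD i "") w = true) →
    (∀ i, i < lo → chiaveLe (L.getD i "") w = true) →
    (∀ i, hi ≤ i → i < L.length → chiaveLe (L.getD i "") w = false) →
    trovaPos L w lo hi ≤ L.length ∧
    (∀ i, i < trovaPos L w lo hi → chiaveLe (L.getD i "") w = true) ∧
    (∀ i, trovaPos L w lo hi ≤ i → i < L.length → chiaveLe (L.getD i "") w = false) := by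
  intro n
  induction n using Nat.strong_induction_on with
  | _ n ih =>
      intro lo hi hn hhi hlohi hmono hpre1 hpre2
      rw [trovaPos]
      by_cases hlt : lo < hi
      · rw [dif_pos hlt]
        have hmid1 : lo ≤ (lo + hi) / 2 := by omega
        have hmid2 : (lo + hi) / 2 < hi := by omega
        have hmlen : (lo + hi) / 2 < L.length := lt_of_lt_of_le hmid2 hhi
        by_cases hc : chiaveLe (L.getD ((lo + hi) / 2) "") w = true
        · rw [if_pos hc]
          exact ih (hi - ((lo + hi) / 2 + 1)) (by omega) _ _ rfl hhi (by omega) hmono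
            (fun i hi' => hmono i ((lo + hi) / 2) (by omega) hmlen hc) hpre2
        · rw [if_neg hc]
          refine ih ((lo + hi) / 2 - lo) (by omega) _ _ rfl (by omega) (by omega) hmono hpre1 ?_
          intro i hi' hil
          cases hci : chiaveLe (L.getD i "") w
          · rfl
          · exact absurd (hmono ((lo + hi) / 2) i hi' hil hci) hc
      · rw [dif_neg hlt]
        have : lo = hi := by omega
        exact ⟨by omega, hpre1, this ▸ hpre2⟩

lemma insertBy_eq_insertAt (w : String) :
    ∀ (L : List String) (r : Nat), r ≤ L.length →
    (∀ i, i < r → chiaveLe (L.getD i "") w = true) →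
    (∀ i, r ≤ i → i < L.length → chiaveLe (L.getD i "") w = false) →
    PySem.List.insertBy (fun a b => beforeB a b) w L = L.take r ++ w :: L.drop r := by
  intro L
  induction L with
  | nil =>
      intro r hr _ _
      have : r = 0 := by simpa using hr
      subst this
      simp [PySem.List.insertBy]
  | cons y ys ihl =>
      intro r hr h1 h2
      rcases r with _ | r'
      · have hy : chiaveLe y w = false := h2 0 (Nat.zero_le 0) (by simp)
        have : beforeB w y = true := by rw [beforeB_eq_not_chiaveLe, hy]; rfl
        simp [PySem.List.insertBy, this]
      · have hy : chiaveLe y w = true := h1 0 (Nat.succ_pos r')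
        have hb : beforeB w y = false := by rw [beforeB_eq_not_chiaveLe, hy]; rfl
        simp only [PySem.List.insertBy, hb, Bool.false_eq_true, if_false,
          List.take_succ_cons, List.drop_succ_cons, List.cons_append, List.cons.injEq,
          true_and]
        exact ihl r' (by simpa using hr)
          (fun i hi => h1 (i + 1) (by omega))
          (fun i hi hil => h2 (i + 1) (by omega) (by simpa using hil))

lemma inserisci_sortB (xs : List String) (w : String) :
    inserisci (sortB xs) w = sortB (xs ++ [w]) := by
  have hsor := sor_sortB xs
  obtain ⟨hle, hpost1, hpost2⟩ :=
    trovaPos_spec (sortB xs) w ((sortB xs).length - 0) 0 (sortB xs).length rfl le_rfl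
      (Nat.zero_le _) (sor_mono _ hsor w) (by omega) (fun i hi hil => absurd hil (by omega))
  show PySem.List.insert (sortB xs) ((trovaPos (sortB xs) w 0 (sortB xs).length : Nat) : Int) w = _
  rw [PySem.List.insert_natCast _ _ _ hle, ← insertBy_eq_insertAt w _ _ hle hpost1 hpost2,
      sortB_append_singleton]

lemma get?_mapD (d : PySem.Dict String (List String)) (k : String) :
    (mapD d).get? k = (d.get? k).map sortB := by
  simp only [mapD, PySem.Dict.get?, List.find?_map]
  have : (fun p : String × List String => p.1 == k) ∘ (fun p : String × List String => (p.1, sortB p.2))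
       = fun p : String × List String => p.1 == k := rfl
  rw [this]
  cases List.find? (fun p : String × List String => p.1 == k) d.items <;> rfl

lemma getD_mapD (d : PySem.Dict String (List String)) (k : String) :
    (mapD d).getD k [] = sortB (d.getD k []) := by
  simp only [PySem.Dict.getD, get?_mapD]
  cases d.get? k <;> simp [sortB_nil]

lemma contains_mapD (d : PySem.Dict String (List String)) (k : String) :
    (mapD d).contains k = d.contains k := by
  rw [PySem.Dict.contains_eq_isSome_get?, PySem.Dict.contains_eq_isSome_get?, get?_mapD]
  cases d.get? k <;> rfl

lemma mapD_insert (d : PySem.Dict String (List String)) (k : String) (v : List String) :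
    mapD (d.insert k v) = (mapD d).insert k (sortB v) := by
  cases h : d.contains k with
  | true =>
      have h' : (mapD d).contains k = true := by rw [contains_mapD]; exact h
      apply PySem.Dict.ext
      rw [show (mapD (d.insert k v)).items = (d.insert k v).items.map (fun p => (p.1, sortB p.2)) from rfl,
          PySem.Dict.items_insert_of_contains d v h,
          PySem.Dict.items_insert_of_contains (mapD d) (sortB v) h']
      show _ = ((d.items.map _).map _)
      rw [List.map_map, List.map_map]
      apply List.map_congr_left
      intro p _
      by_cases hp : p.1 = k <;> simp [hp]
  | false =>
      have h' : (mapD d).contains k = false := by rw [contains_mapD]; exact h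
      apply PySem.Dict.ext
      rw [show (mapD (d.insert k v)).items = (d.insert k v).items.map (fun p => (p.1, sortB p.2)) from rfl,
          PySem.Dict.items_insert_of_not_contains d v h,
          PySem.Dict.items_insert_of_not_contains (mapD d) (sortB v) h']
      simp [mapD]

-- net effect of A's per-letter step
lemma aStep_eq (d : PySem.Dict String (List String)) (l w : String) :
    ((if d.contains l then d else d.insert l []).modify l [] (fun xs => xs ++ [w]))
      = d.insert l (d.getD l [] ++ [w]) := by
  cases h : d.contains l with
  | true => simp [PySem.Dict.modify]
  | false =>
      simp only [if_false, Bool.false_eq_true, PySem.Dict.modify]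
      rw [PySem.Dict.getD_insert]
      simp [PySem.Dict.insert_insert_self, PySem.Dict.getD_of_not_contains d _ h]

-- ===== counter characterisation =====

lemma items_counter (cs : List Char) :
    (PySem.Dict.counter cs).items = (PySem.Set.ofList cs).map (fun c => (c, (cs.count c : Int))) := by
  induction cs using List.reverseRecOn with
  | nil => rfl
  | append_singleton cs c ih =>
      have hstep : PySem.Dict.counter (cs ++ [c])
          = (PySem.Dict.counter cs).insert c ((PySem.Dict.counter cs).getD c 0 + 1) := by
        simp [PySem.Dict.counter, List.foldl_append, PySem.Dict.modify]
      have hkeys : (PySem.Dict.counter cs).keys = PySem.Set.ofList cs := by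
        show (PySem.Dict.counter cs).items.map (·.1) = _
        rw [ih, List.map_map,
            show ((·.1) ∘ fun c : Char => (c, (cs.count c : Int))) = id from rfl, List.map_id]
      have hget : (PySem.Dict.counter cs).getD c 0 = (cs.count c : Int) :=
        PySem.Dict.getD_counter cs c
      by_cases hmem : c ∈ cs
      · have hcont : (PySem.Dict.counter cs).contains c = true := by
          rw [PySem.Dict.contains_eq_decide_mem_keys, hkeys]
          simp [PySem.Set.mem_ofList, hmem]
        rw [hstep, PySem.Dict.items_insert_of_contains _ _ hcont, ih, List.map_map,
            PySem.Set.ofList_append_singleton,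
            PySem.Set.add_of_mem ((PySem.Set.mem_ofList cs c).mpr hmem)]
        apply List.map_congr_left
        intro a _
        by_cases ha : a = c
        · subst ha
          simp [hget, List.count_append]
        · simp [ha, List.count_append, Ne.symm ha]
      · have hcont : (PySem.Dict.counter cs).contains c = false := by
          rw [PySem.Dict.contains_eq_decide_mem_keys, hkeys]
          simp [PySem.Set.mem_ofList, hmem]
        rw [hstep, PySem.Dict.items_insert_of_not_contains _ _ hcont, ih,
            PySem.Set.ofList_append_singleton,
            PySem.Set.add_of_not_mem (fun h => hmem ((PySem.Set.mem_ofList cs c).mp h)),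
            List.map_append]
        congr 1
        · apply List.map_congr_left
          intro a ha
          have hac : a ≠ c := fun h => hmem (h ▸ (PySem.Set.mem_ofList cs a).mp ha)
          simp [List.count_append, Ne.symm hac]
        · simp [hget, List.count_append, List.count_eq_zero.mpr hmem]

lemma values_counter (cs : List Char) :
    (PySem.Dict.counter cs).values = (PySem.Set.ofList cs).map (fun c => (cs.count c : Int)) := by
  show (PySem.Dict.counter cs).items.map (·.2) = _
  rw [items_counter, List.map_map]; rfl

-- max over the counts of all chars = max over the counts of the distinct chars
lemma max_eq (cs : List Char) :
    (PySem.List.max? (cs.map (fun c => (cs.count c : Int))) (fun v => v)).getD 0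
      = (PySem.List.max? ((PySem.Set.ofList cs).map (fun c => (cs.count c : Int))) (fun v => v)).getD 0 := by
  rcases cs with _ | ⟨c0, cs'⟩
  · rfl
  · set cs := c0 :: cs' with hcs
    have hA : cs.map (fun c => (cs.count c : Int)) ≠ [] := by simp [hcs]
    have hB : (PySem.Set.ofList cs).map (fun c => (cs.count c : Int)) ≠ [] := by
      have : c0 ∈ PySem.Set.ofList cs := (PySem.Set.mem_ofList cs c0).mpr (by simp [hcs])
      intro h
      rw [List.map_eq_nil_iff] at h
      simp [h] at this
    rcases hA' : PySem.List.max? (cs.map (fun c => (cs.count c : Int))) (fun v => v) with _ | mA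
    · exact absurd ((PySem.List.max?_eq_none_iff _ _).mp hA') hA
    rcases hB' : PySem.List.max? ((PySem.Set.ofList cs).map (fun c => (cs.count c : Int))) (fun v => v) with _ | mB
    · exact absurd ((PySem.List.max?_eq_none_iff _ _).mp hB') hB
    have hAmem := PySem.List.max?_mem hA'
    have hBmem := PySem.List.max?_mem hB'
    have hAmax := PySem.List.max?_isMax hA'
    have hBmax := PySem.List.max?_isMax hB'
    simp only [Option.getD_some]
    apply le_antisymm
    · rcases List.mem_map.mp hAmem with ⟨a, ha, rfl⟩
      exact hBmax _ (List.mem_map.mpr ⟨a, (PySem.Set.mem_ofList cs a).mpr ha, rfl⟩)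
    · rcases List.mem_map.mp hBmem with ⟨b, hb, rfl⟩
      exact hAmax _ (List.mem_map.mpr ⟨b, (PySem.Set.mem_ofList cs b).mp hb, rfl⟩)

-- ===== set lemmas =====

lemma ofList_filter (q : Char → Bool) (l : List Char) :
    PySem.Set.ofList (l.filter q) = (PySem.Set.ofList l).filter q := by
  induction l using List.reverseRecOn with
  | nil => rfl
  | append_singleton l x ih =>
      rw [List.filter_append, PySem.Set.ofList_append_singleton]
      by_cases hq : q x
      · rw [show List.filter q [x] = [x] by simp [hq], PySem.Set.ofList_append_singleton, ih]
        by_cases hm : x ∈ PySem.Set.ofList l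
        · rw [PySem.Set.add_of_mem hm,
              PySem.Set.add_of_mem (by simp [List.mem_filter, hm, hq])]
        · rw [PySem.Set.add_of_not_mem hm,
              PySem.Set.add_of_not_mem (by simp [List.mem_filter, hm]), List.filter_append]
          simp [hq]
      · rw [show List.filter q [x] = [] by simp [hq], List.append_nil, ih]
        by_cases hm : x ∈ PySem.Set.ofList l
        · rw [PySem.Set.add_of_mem hm]
        · rw [PySem.Set.add_of_not_mem hm, List.filter_append]
          simp [hq]

lemma ofList_map_mk (l : List Char) :
    PySem.Set.ofList (l.map (fun c => String.ofList [c]))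
      = (PySem.Set.ofList l).map (fun c => String.ofList [c]) := by
  have hinj : ∀ a b : Char, String.ofList [a] = String.ofList [b] → a = b := by
    intro a b h
    have := String.ofList_inj.mp h
    simpa using this
  induction l using List.reverseRecOn with
  | nil => rfl
  | append_singleton l x ih =>
      simp only [List.map_append, List.map_singleton]
      rw [PySem.Set.ofList_append_singleton, PySem.Set.ofList_append_singleton, ih]
      by_cases hm : x ∈ PySem.Set.ofList l
      · rw [PySem.Set.add_of_mem hm,
            PySem.Set.add_of_mem (List.mem_map.mpr ⟨x, hm, rfl⟩)]
      · rw [PySem.Set.add_of_not_mem hm, PySem.Set.add_of_not_mem ?_, List.map_append,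
            List.map_singleton]
        intro h
        rcases List.mem_map.mp h with ⟨y, hy, hxy⟩
        exact hm (hinj y x hxy ▸ hy)

-- ===== per-word equality of the two letter lists =====

lemma massime_eq (w : String) :
    massime_lettere w
      = (((PySem.Set.ofList (PySem.Str.lower w).toList).filter
            (fun c => ((PySem.Str.lower w).toList.count c : Int)
              == (PySem.List.max? ((PySem.Dict.counter (PySem.Str.lower w).toList).values) (fun v => v)).getD 0)).map
          (fun c => String.ofList [c])) := by
  simp only [massime_lettere]
  rw [max_eq, ← values_counter, ofList_map_mk, ofList_filter]

-- ===== the main fold invariant =====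

lemma fold_letters (l : List Char) (w : String) (d : PySem.Dict String (List String)) :
    l.foldl (fun dB c =>
        dB.insert (String.ofList [c]) (inserisci (dB.getD (String.ofList [c]) []) w)) (mapD d)
      = mapD (l.foldl (fun dA c =>
          (if dA.contains (String.ofList [c]) then dA
           else dA.insert (String.ofList [c]) []).modify (String.ofList [c]) [] (fun xs => xs ++ [w])) d) := by
  induction l generalizing d with
  | nil => rfl
  | cons c l ih =>
      simp only [List.foldl_cons]
      rw [show (mapD d).insert (String.ofList [c]) (inserisci ((mapD d).getD (String.ofList [c]) []) w)
            = mapD ((if d.contains (String.ofList [c]) then d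
                     else d.insert (String.ofList [c]) []).modify (String.ofList [c]) [] (fun xs => xs ++ [w])) by
        rw [aStep_eq, getD_mapD, inserisci_sortB, mapD_insert]]
      exact ih _

lemma word_step (d : PySem.Dict String (List String)) (w : String) :
    ((PySem.Dict.counter (PySem.Str.lower w).toList).items.foldl (fun dizionario p =>
        if p.2 == (PySem.List.max? ((PySem.Dict.counter (PySem.Str.lower w).toList).values) (fun v => v)).getD 0 then
          dizionario.insert (String.ofList [p.1]) (inserisci (dizionario.getD (String.ofList [p.1]) []) w)
        else dizionario) (mapD d))
      = mapD ((massime_lettere w).foldl (fun dizionario lettera =>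
          (if dizionario.contains lettera then dizionario
           else dizionario.insert lettera []).modify lettera [] (fun xs => xs ++ [w])) d) := by
  rw [items_counter, List.foldl_map, massime_eq, List.foldl_map, ← List.foldl_filter]
  exact fold_letters _ w d

lemma fold_words (ws : List String) (d : PySem.Dict String (List String)) :
    (ws.foldl (fun dizionario parola =>
      (PySem.Dict.counter (PySem.Str.lower parola).toList).items.foldl (fun dizionario p =>
        if p.2 == (PySem.List.max? ((PySem.Dict.counter (PySem.Str.lower parola).toList).values) (fun v => v)).getD 0 then
          dizionario.insert (String.ofList [p.1]) (inserisci (dizionario.getD (String.ofList [p.1]) []) parola)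
        else dizionario) dizionario) (mapD d))
      = mapD (ws.foldl (fun dizionario parola =>
          (massime_lettere parola).foldl (fun dizionario lettera =>
            (if dizionario.contains lettera then dizionario
             else dizionario.insert lettera []).modify lettera [] (fun xs => xs ++ [parola])) dizionario) d) := by
  induction ws generalizing d with
  | nil => rfl
  | cons w ws ih =>
      simp only [List.foldl_cons]
      rw [word_step d w]
      exact ih _

-- ===== A's final sort loop = mapD =====

lemma nodup_keys_foldA (ws : List String) (d : PySem.Dict String (List String)) (h : d.keys.Nodup) :
    (ws.foldl (fun dizionario parola =>
      (massime_lettere parola).foldl (fun dizionario lettera =>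
        (if dizionario.contains lettera then dizionario
         else dizionario.insert lettera []).modify lettera [] (fun xs => xs ++ [parola])) dizionario) d).keys.Nodup := by
  have inner : ∀ (ls : List String) (w : String) (d : PySem.Dict String (List String)), d.keys.Nodup →
      (ls.foldl (fun dizionario lettera =>
        (if dizionario.contains lettera then dizionario
         else dizionario.insert lettera []).modify lettera [] (fun xs => xs ++ [w])) d).keys.Nodup := by
    intro ls w
    induction ls with
    | nil => intro d hd; exact hd
    | cons a ls ih =>
        intro d hd
        simp only [List.foldl_cons]
        rw [aStep_eq]
        exact ih _ (PySem.Dict.nodup_keys_insert _ _ _ hd)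
  induction ws generalizing d with
  | nil => exact h
  | cons w ws ih =>
      simp only [List.foldl_cons]
      exact ih _ (inner _ w d h)

lemma keys_sortfold (ks : List String) (d : PySem.Dict String (List String))
    (h : ∀ k ∈ ks, d.contains k = true) :
    (ks.foldl (fun d lettera => d.modify lettera [] sortB) d).keys = d.keys := by
  induction ks generalizing d with
  | nil => rfl
  | cons k ks ih =>
      simp only [List.foldl_cons]
      have hk := h k (by simp)
      have hkeys : (d.modify k [] sortB).keys = d.keys := by
        rw [PySem.Dict.keys_modify, PySem.Dict.keys_insert_of_contains _ _ hk]
      rw [ih _ ?_, hkeys]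
      intro k' hk'
      rw [PySem.Dict.contains_eq_decide_mem_keys, hkeys,
          ← PySem.Dict.contains_eq_decide_mem_keys]
      exact h k' (by simp [hk'])

lemma getD_sortfold (ks : List String) (d : PySem.Dict String (List String)) (j : String)
    (h : ks.Nodup) :
    (ks.foldl (fun d lettera => d.modify lettera [] sortB) d).getD j []
      = if j ∈ ks then sortB (d.getD j []) else d.getD j [] := by
  induction ks generalizing d with
  | nil => simp
  | cons k ks ih =>
      simp only [List.foldl_cons]
      rw [ih _ h.of_cons]
      by_cases hjk : j = k
      · subst hjk
        have hjs : j ∉ ks := (List.nodup_cons.mp h).1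
        simp [hjs, PySem.Dict.getD_modify_self]
      · rw [PySem.Dict.getD_modify_of_ne _ _ _ hjk]
        by_cases hjs : j ∈ ks <;> simp [hjs, hjk]

lemma sortLoop_eq (d : PySem.Dict String (List String)) (h : d.keys.Nodup) :
    (d.keys.foldl (fun d lettera => d.modify lettera [] sortB) d).items
      = (mapD d).items := by
  set d2 := d.keys.foldl (fun d lettera => d.modify lettera [] sortB) d with hd2
  have hcont : ∀ k ∈ d.keys, d.contains k = true := by
    intro k hk
    rw [PySem.Dict.contains_eq_decide_mem_keys]
    simp [hk]
  have hkeys : d2.keys = d.keys := keys_sortfold _ _ hcont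
  have hnd2 : d2.keys.Nodup := hkeys ▸ h
  rw [PySem.Dict.items_eq_map_keys d2 hnd2 [], hkeys,
      show (mapD d).items = d.items.map (fun p => (p.1, sortB p.2)) from rfl,
      PySem.Dict.items_eq_map_keys d h [], List.map_map]
  apply List.map_congr_left
  intro k hk
  rw [hd2, getD_sortfold _ _ _ h]
  simp [hk]

-- ===== VERDICT (by name: the statement is the Claim_ definition above) =====
theorem organizza_parole_spec : Claim_equal_organizza_parole := by
  intro parole _ _
  unfold Spec_organizza_parole
  simp only [organizza_parole, organizza_parole_alt]
  rw [show (fun xs => PySem.List.sorted2 xs (fun p => PySem.Str.lower p) (fun p => p)) = sortB from rfl]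
  conv_rhs => rw [show (PySem.Dict.empty : PySem.Dict String (List String)) = mapD PySem.Dict.empty from rfl,
    fold_words]
  exact sortLoop_eq _ (nodup_keys_foldA parole PySem.Dict.empty PySem.Dict.nodup_keys_empty)
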